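-- pv_equiv track=rewrite | github.com/absjuwel/AI_Lab_232031062 | AI Lab_ Juwel/Informed Search/greedy_best_first.py | greedy_best_first
-- ===== SOURCE A (Python) =====
-- graph = {
--     'A': {'B': 1, 'C': 3},
--     'B': {'D': 3, 'E': 1},
--     'C': {'F': 2},
--     'D': {},
--     'E': {'F': 1},
--     'F': {}
-- }
--
-- heuristic = {
--     'A': 5,
--     'B': 3,
--     'C': 2,
--     'D': 6,
--     'E': 1,
--     'F': 0
-- }
--
-- def greedy_best_first(start, goal):
--     visited = set()
--     queue = [(heuristic[start], start, [start])]
--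
--     while queue:
--         queue.sort(key=lambda x: x[0])
--         h, node, path = queue.pop(0)
--         if node == goal:
--             return path
--         if node not in visited:
--             visited.add(node)
--             for neighbor in graph[node]:
--                 queue.append((heuristic[neighbor], neighbor, path + [neighbor]))
--     return None
-- ===== SOURCE B (Python) =====
-- graph = {
--     'A': {'B': 1, 'C': 3},
--     'B': {'D': 3, 'E': 1},
--     'C': {'F': 2},
--     'D': {},
--     'E': {'F': 1},
--     'F': {}
-- }
--
-- heuristic = {
--     'A': 5,
--     'B': 3,
--     'C': 2,
--     'D': 6,
--     'E': 1,
--     'F': 0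
-- }
--
-- def _lt(x, y):
--     # lexicographic comparison on (heuristic, insertion counter); the counter is
--     # unique, so entries never tie and paths are never compared
--     return x[0] < y[0] or (x[0] == y[0] and x[1] < y[1])
--
-- def _heappush(heap, item):
--     # append, then sift the new entry up to its place in the binary min-heap
--     heap.append(item)
--     i = len(heap) - 1
--     while i > 0:
--         parent = (i - 1) // 2
--         if _lt(heap[i], heap[parent]):
--             heap[i], heap[parent] = heap[parent], heap[i]
--             i = parent
--         else:
--             break
--
-- def _heappop(heap):
--     # remove and return the minimum entry; move the last entry to the root and
--     # sift it down
--     last = heap.pop()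
--     if not heap:
--         return last
--     item = heap[0]
--     heap[0] = last
--     i = 0
--     n = len(heap)
--     while True:
--         l = 2 * i + 1
--         r = 2 * i + 2
--         m = i
--         if l < n and _lt(heap[l], heap[m]):
--             m = l
--         if r < n and _lt(heap[r], heap[m]):
--             m = r
--         if m == i:
--             break
--         heap[i], heap[m] = heap[m], heap[i]
--         i = m
--     return item
--
-- def greedy_best_first(start, goal):
--     # binary min-heap frontier keyed by (heuristic, insertion counter) instead of
--     # re-sorting a list each iteration; the counter reproduces the stable sort's
--     # earliest-inserted tie-break
--     visited = set()
--     counter = 0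
--     heap = [(heuristic[start], counter, start, [start])]
--     while heap:
--         h, _, node, path = _heappop(heap)
--         if node == goal:
--             return path
--         if node not in visited:
--             visited.add(node)
--             for neighbor in graph[node]:
--                 counter += 1
--                 _heappush(heap, (heuristic[neighbor], counter, neighbor, path + [neighbor]))
--     return None
-- ===== Notes on version B (the rewrite author's own statement) =====
-- stated objective: alternative
-- what changed: The frontier is a hand-written binary min-heap keyed by (heuristic, insertion counter) with sift-up on push and sift-down on pop, replacing A's per-iteration stable sort + pop(0) list frontier; the unique counter reproduces the stable sort's earliest-inserted tie-break.
import Mathlib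
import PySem

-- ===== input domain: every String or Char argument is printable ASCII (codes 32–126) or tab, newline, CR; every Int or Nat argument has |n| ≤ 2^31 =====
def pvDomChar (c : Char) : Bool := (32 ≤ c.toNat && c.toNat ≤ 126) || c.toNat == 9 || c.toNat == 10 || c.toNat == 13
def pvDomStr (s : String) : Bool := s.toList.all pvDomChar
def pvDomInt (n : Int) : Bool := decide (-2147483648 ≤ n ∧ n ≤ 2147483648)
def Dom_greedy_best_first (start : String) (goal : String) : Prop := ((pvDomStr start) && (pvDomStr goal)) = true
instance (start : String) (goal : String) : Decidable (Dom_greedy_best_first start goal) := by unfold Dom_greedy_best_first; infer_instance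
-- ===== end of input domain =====

-- B replaces A's per-iteration stable sort + pop(0) list frontier by a hand-written
-- binary min-heap keyed by (heuristic, insertion counter); equivalence proved on all
-- starts that are graph nodes (elsewhere both Pythons raise KeyError).

-- ===== PORT A =====
-- module-level graph: dict of dicts (neighbor -> cost); iteration over graph[node] yields keys
def pvGraph : PySem.Dict String (PySem.Dict String Int) := PySem.Dict.ofList
  [("A", PySem.Dict.ofList [("B", 1), ("C", 3)]),
   ("B", PySem.Dict.ofList [("D", 3), ("E", 1)]),
   ("C", PySem.Dict.ofList [("F", 2)]),
   ("D", PySem.Dict.ofList []),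
   ("E", PySem.Dict.ofList [("F", 1)]),
   ("F", PySem.Dict.ofList [])]

def pvHeur : PySem.Dict String Int := PySem.Dict.ofList
  [("A", 5), ("B", 3), ("C", 2), ("D", 6), ("E", 1), ("F", 0)]

-- the while-loop of A: sort the queue (stable, key = heuristic), pop the front.
-- fuel: the loop pops ≤ 1 + Σ degrees = 7 items; fuel 16 is never exhausted on Pre_ inputs.
def pvLoopA : Nat → PySem.Set String → List (Int × String × List String) → String → Option (List String)
  | 0, _, _, _ => none
  | fuel + 1, visited, queue, goal =>
    match queue with
    | [] => none
    | _ :: _ =>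
      match PySem.List.sorted queue (fun x => x.1) false with
      | [] => none  -- unreachable: sorted of a nonempty list is nonempty
      | (_, node, path) :: rest =>
        if node == goal then some path
        else if PySem.Set.contains visited node then pvLoopA fuel visited rest goal
        else
          pvLoopA fuel (PySem.Set.add visited node)
            (rest ++ (PySem.Dict.getD pvGraph node (PySem.Dict.ofList [])).keys.map
              (fun nb => (PySem.Dict.getD pvHeur nb 0, nb, path ++ [nb]))) goal

def greedy_best_first (start : String) (goal : String) : Option (List String) :=
  match PySem.Dict.get? pvHeur start with
  | none => none  -- heuristic[start] raises KeyError: outside Pre_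
  | some h => pvLoopA 16 PySem.Set.empty [(h, start, [start])] goal

-- ===== PORT B =====
-- heap entry: (heuristic, insertion counter, node, path)
def pvE := Int × Int × String × List String
-- _lt compares entries lexicographically on (heuristic, counter) only
def pvLt (x y : pvE) : Bool := x.1 < y.1 || (x.1 == y.1 && x.2.1 < y.2.1)

-- _heappush's sift-up while-loop; i strictly decreases each iteration, so
-- fuel = length of the heap is never exhausted; out-of-range indices (unreachable
-- at the call sites) just return the heap, a totality guard only
def pvSiftUp : Nat → List pvE → Nat → List pvE
  | 0, heap, _ => heap
  | _ + 1, heap, 0 => heap                       -- while i > 0 exits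
  | fuel + 1, heap, i + 1 =>
    let p := i / 2                                -- parent = (i - 1) // 2 at index i+1
    match heap[i + 1]?, heap[p]? with
    | some a, some b =>
      if pvLt a b then pvSiftUp fuel ((heap.set (i + 1) b).set p a) p
      else heap
    | _, _ => heap

-- _heappop's sift-down while-loop; i strictly increases and is bounded by the
-- length, so fuel = length is never exhausted
-- 'if j < n and _lt(heap[j], heap[m]): m = j' (j ≥ n makes heap[j]? none)
def pvPick (heap : List pvE) (j m : Nat) : Nat :=
  match heap[j]?, heap[m]? with
  | some a, some b => if pvLt a b then j else m
  | _, _ => m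

def pvSiftDown : Nat → List pvE → Nat → List pvE
  | 0, heap, _ => heap
  | fuel + 1, heap, i =>
    let m := pvPick heap (2 * i + 2) (pvPick heap (2 * i + 1) i)
    if m == i then heap
    else match heap[i]?, heap[m]? with
      | some a, some b => pvSiftDown fuel ((heap.set i b).set m a) m
      | _, _ => heap

-- _heappush: append then sift up from the last index
def pvHeapPush (heap : List pvE) (item : pvE) : List pvE :=
  pvSiftUp (heap ++ [item]).length (heap ++ [item]) heap.length

-- _heappop: none on the empty heap (the while-loop guard); else pop the last
-- entry, move it to the root and sift it down
def pvHeapPop (heap : List pvE) : Option (pvE × List pvE) :=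
  match heap.getLast? with
  | none => none
  | some last =>
    match heap.dropLast with
    | [] => some (last, [])
    | r0 :: rs =>
      let rest := (r0 :: rs).set 0 last
      some (r0, pvSiftDown rest.length rest 0)

-- the while-loop of B; state carries the insertion counter
def pvLoopB : Nat → PySem.Set String → Int → List pvE → String → Option (List String)
  | 0, _, _, _, _ => none
  | fuel + 1, visited, counter, heap, goal =>
    match pvHeapPop heap with
    | none => none
    | some ((_, _, node, path), rest) =>
      if node == goal then some path
      else if PySem.Set.contains visited node then pvLoopB fuel visited counter rest goal
      else
        let st := (PySem.Dict.getD pvGraph node (PySem.Dict.ofList [])).keys.foldl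
          (fun (s : Int × List pvE) nb =>
            (s.1 + 1, pvHeapPush s.2 (PySem.Dict.getD pvHeur nb 0, s.1 + 1, nb, path ++ [nb])))
          (counter, rest)
        pvLoopB fuel (PySem.Set.add visited node) st.1 st.2 goal

def greedy_best_first_alt (start : String) (goal : String) : Option (List String) :=
  match PySem.Dict.get? pvHeur start with
  | none => none  -- heuristic[start] raises KeyError: outside Pre_
  | some h => pvLoopB 16 PySem.Set.empty 0 [(h, 0, start, [start])] goal

-- ===== PRECONDITION & SPEC =====
-- Pre_ excludes exactly the starts outside the fixed graph, where heuristic[start]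
-- raises KeyError in both A and B.
def Pre_greedy_best_first (start : String) (goal : String) : Prop :=
  start = "A" ∨ start = "B" ∨ start = "C" ∨ start = "D" ∨ start = "E" ∨ start = "F"
instance (start : String) (goal : String) : Decidable (Pre_greedy_best_first start goal) := by
  unfold Pre_greedy_best_first; infer_instance

def pvWitness_greedy_best_first : String × String := ("A", "F")

def Spec_greedy_best_first (start : String) (goal : String) (out : Option (List String)) : Prop := out = greedy_best_first_alt start goal
instance (start : String) (goal : String) (out : Option (List String)) : Decidable (Spec_greedy_best_first start goal out) := by unfold Spec_greedy_best_first; infer_instance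

-- ===== CLAIM (what is proved, stated in full; the proofs are below) =====
def Claim_equal_greedy_best_first : Prop := ∀ (start : String) (goal : String), Dom_greedy_best_first start goal → Pre_greedy_best_first start goal → Spec_greedy_best_first start goal (greedy_best_first start goal)

-- ===== LEMMAS AND PROOFS =====

-- the six node names of the fixed graph
def pvNode (s : String) : Prop :=
  s = "A" ∨ s = "B" ∨ s = "C" ∨ s = "D" ∨ s = "E" ∨ s = "F"

lemma pv_nbr_node (node : String) (hn : pvNode node) :
    ∀ x ∈ (PySem.Dict.getD pvGraph node (PySem.Dict.ofList [])).keys, pvNode x := by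
  rcases hn with h | h | h | h | h | h <;> subst h <;> simp only [pvNode] <;> decide

-- when goal is none of the six node names, loop A never returns a path
lemma pvLoopA_none : ∀ (fuel : Nat) (visited : PySem.Set String)
    (queue : List (Int × String × List String)) (goal : String),
    (∀ x ∈ queue, pvNode x.2.1) → (∀ s, pvNode s → (s == goal) = false) →
    pvLoopA fuel visited queue goal = none := by
  intro fuel
  induction fuel with
  | zero => intro _ _ _ _ _; rfl
  | succ n ih =>
    intro visited queue goal hq hg
    match queue with
    | [] => rfl
    | q :: qs =>
      have hlen : (PySem.List.sorted (q :: qs) (fun x => x.1) false).length =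
          (q :: qs).length := PySem.List.length_sorted _ _ _
      match hs : PySem.List.sorted (q :: qs) (fun x => x.1) false with
      | [] => rw [hs] at hlen; simp at hlen
      | (h0, node, path) :: rest =>
        have hmem : (h0, node, path) ∈ q :: qs :=
          (PySem.List.mem_sorted _ _ _ _).1 (hs ▸ List.mem_cons_self)
        have hnode : pvNode node := hq _ hmem
        have hrest : ∀ x ∈ rest, pvNode x.2.1 := fun x hx =>
          hq _ ((PySem.List.mem_sorted _ _ _ _).1 (hs ▸ List.mem_cons_of_mem _ hx))
        simp only [pvLoopA, hs, hg node hnode, Bool.false_eq_true, if_false]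
        by_cases hv : PySem.Set.contains visited node = true
        · simp only [hv, if_true]; exact ih _ _ _ hrest hg
        · simp only [hv]
          refine ih _ _ _ ?_ hg
          intro x hx
          rcases List.mem_append.1 hx with hx | hx
          · exact hrest x hx
          · rcases List.mem_map.1 hx with ⟨nb, hnb, rfl⟩
            exact pv_nbr_node node hnode nb hnb

-- two sets whose written values come from the list keep membership inside the list
lemma pv_mem_set2 {heap : List pvE} {i j : Nat} {a b y : pvE}
    (ha : a ∈ heap) (hb : b ∈ heap) (hy : y ∈ (heap.set i b).set j a) : y ∈ heap := by
  rcases List.mem_or_eq_of_mem_set hy with hy | rfl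
  · rcases List.mem_or_eq_of_mem_set hy with hy | rfl
    · exact hy
    · exact hb
  · exact ha

-- sift-up only permutes entries of the heap
lemma pv_mem_siftUp : ∀ (fuel : Nat) (heap : List pvE) (i : Nat),
    ∀ y ∈ pvSiftUp fuel heap i, y ∈ heap := by
  intro fuel
  induction fuel with
  | zero => intro heap i y hy; exact hy
  | succ n ih =>
    intro heap i y hy
    match i with
    | 0 => exact hy
    | j + 1 =>
      rw [pvSiftUp] at hy
      rcases h1 : heap[j + 1]? with _ | a <;> rcases h2 : heap[j / 2]? with _ | b <;>
        simp only [h1, h2] at hy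
      · exact hy
      · exact hy
      · exact hy
      · split at hy
        · exact pv_mem_set2 (List.mem_of_getElem? h1) (List.mem_of_getElem? h2) (ih _ _ y hy)
        · exact hy

-- sift-down only permutes entries of the heap
lemma pv_mem_siftDown : ∀ (fuel : Nat) (heap : List pvE) (i : Nat),
    ∀ y ∈ pvSiftDown fuel heap i, y ∈ heap := by
  intro fuel
  induction fuel with
  | zero => intro heap i y hy; exact hy
  | succ n ih =>
    intro heap i y hy
    rw [pvSiftDown] at hy
    split at hy
    · exact hy
    · split at hy
      · rename_i a b h1 h2
        exact pv_mem_set2 (List.mem_of_getElem? h1) (List.mem_of_getElem? h2) (ih _ _ y hy)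
      · exact hy

-- push keeps entries inside heap ∪ {item}
lemma pv_mem_push {heap : List pvE} {item y : pvE} (hy : y ∈ pvHeapPush heap item) :
    y ∈ heap ∨ y = item := by
  have := pv_mem_siftUp _ _ _ y hy
  rcases List.mem_append.1 this with h | h
  · exact Or.inl h
  · exact Or.inr (List.mem_singleton.1 h)

-- pop returns an entry of the heap and a remainder inside the heap
lemma pv_mem_pop {heap : List pvE} {x : pvE} {rest : List pvE}
    (hp : pvHeapPop heap = some (x, rest)) : x ∈ heap ∧ ∀ y ∈ rest, y ∈ heap := by
  unfold pvHeapPop at hp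
  rcases hl : heap.getLast? with _ | last <;> rw [hl] at hp
  · exact absurd hp (by simp)
  · have hlast : last ∈ heap := List.mem_of_getLast? hl
    rcases hd : heap.dropLast with _ | ⟨r0, rs⟩ <;> rw [hd] at hp <;>
      simp only [Option.some.injEq, Prod.mk.injEq] at hp
    · exact ⟨hp.1 ▸ hlast, by simp [← hp.2]⟩
    · refine ⟨hp.1 ▸ List.mem_of_mem_dropLast (hd ▸ List.mem_cons_self), ?_⟩
      intro y hy
      rw [← hp.2] at hy
      have := pv_mem_siftDown _ _ _ y hy
      rcases List.mem_or_eq_of_mem_set this with h | rfl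
      · exact List.mem_of_mem_dropLast (hd ▸ h)
      · exact hlast

-- the neighbor-push fold keeps every heap entry's node a graph node
lemma pv_fold_node (keys : List String) :
    ∀ (cnt : Int) (hp : List pvE) (path : List String),
    (∀ x ∈ hp, pvNode x.2.2.1) → (∀ nb ∈ keys, pvNode nb) →
    ∀ y ∈ (keys.foldl
      (fun (s : Int × List pvE) nb =>
        (s.1 + 1, pvHeapPush s.2 (PySem.Dict.getD pvHeur nb 0, s.1 + 1, nb, path ++ [nb])))
      (cnt, hp)).2, pvNode y.2.2.1 := by
  induction keys with
  | nil => intro cnt hp path hhp _ y hy; exact hhp y hy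
  | cons k ks ih =>
    intro cnt hp path hhp hks y hy
    refine ih (cnt + 1) _ path ?_ (fun nb h => hks nb (List.mem_cons_of_mem _ h)) y hy
    intro x hx
    rcases pv_mem_push hx with h | rfl
    · exact hhp x h
    · exact hks k List.mem_cons_self

-- when goal is none of the six node names, loop B never returns a path
lemma pvLoopB_none : ∀ (fuel : Nat) (visited : PySem.Set String) (counter : Int)
    (heap : List pvE) (goal : String),
    (∀ x ∈ heap, pvNode x.2.2.1) → (∀ s, pvNode s → (s == goal) = false) →
    pvLoopB fuel visited counter heap goal = none := by
  intro fuel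
  induction fuel with
  | zero => intro _ _ _ _ _ _; rfl
  | succ n ih =>
    intro visited counter heap goal hq hg
    rcases hp : pvHeapPop heap with _ | ⟨⟨h0, c0, node, path⟩, rest⟩
    · rw [pvLoopB, hp]
    · obtain ⟨hxmem, hrestmem⟩ := pv_mem_pop hp
      have hnode : pvNode node := hq _ hxmem
      have hrest : ∀ x ∈ rest, pvNode x.2.2.1 := fun x hx => hq _ (hrestmem x hx)
      rw [pvLoopB, hp]
      simp only [hg node hnode, Bool.false_eq_true, if_false]
      by_cases hv : PySem.Set.contains visited node = true
      · simp only [hv, if_true]; exact ih _ _ _ _ hrest hg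
      · simp only [hv]
        exact ih _ _ _ _ (pv_fold_node _ _ _ _ hrest (pv_nbr_node node hnode)) hg

-- goal is none of the six node names: both searches exhaust the graph and return none
lemma pv_no_goal (start goal : String) (hs : pvNode start)
    (hg : ∀ s, pvNode s → (s == goal) = false) :
    greedy_best_first start goal = greedy_best_first_alt start goal := by
  have hqA : ∀ (h : Int), ∀ x ∈ [(h, start, [start])], pvNode x.2.1 := by
    intro h x hx; rw [List.mem_singleton.1 hx]; exact hs
  have hqB : ∀ (h : Int), ∀ x ∈ ([(h, 0, start, [start])] : List pvE), pvNode x.2.2.1 := by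
    intro h x hx; rw [List.mem_singleton.1 hx]; exact hs
  rcases hs with h | h | h | h | h | h <;> subst h <;>
    simp only [greedy_best_first, greedy_best_first_alt,
      show pvHeur.get? "A" = some 5 from rfl, show pvHeur.get? "B" = some 3 from rfl,
      show pvHeur.get? "C" = some 2 from rfl, show pvHeur.get? "D" = some 6 from rfl,
      show pvHeur.get? "E" = some 1 from rfl, show pvHeur.get? "F" = some 0 from rfl] <;>
    rw [pvLoopA_none 16 _ _ _ (hqA _) hg, pvLoopB_none 16 _ _ _ _ (hqB _) hg]

-- ===== VERDICT (by name: the statement is the Claim_ definition above) =====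
theorem greedy_best_first_spec : Claim_equal_greedy_best_first := by
  intro start goal _ hpre
  unfold Spec_greedy_best_first
  by_cases hA : goal = "A"; · subst hA; rcases hpre with h | h | h | h | h | h <;> subst h <;> decide
  by_cases hB : goal = "B"; · subst hB; rcases hpre with h | h | h | h | h | h <;> subst h <;> decide
  by_cases hC : goal = "C"; · subst hC; rcases hpre with h | h | h | h | h | h <;> subst h <;> decide
  by_cases hD : goal = "D"; · subst hD; rcases hpre with h | h | h | h | h | h <;> subst h <;> decide
  by_cases hE : goal = "E"; · subst hE; rcases hpre with h | h | h | h | h | h <;> subst h <;> decide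
  by_cases hF : goal = "F"; · subst hF; rcases hpre with h | h | h | h | h | h <;> subst h <;> decide
  refine pv_no_goal start goal hpre ?_
  intro s hsn
  rcases hsn with h | h | h | h | h | h <;> subst h <;>
    simp [beq_eq_false_iff_ne, Ne.symm, hA, hB, hC, hD, hE, hF]
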